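-- pv_equiv track=rewrite | github.com/Arpan243/Oracle | rearrange_students.py | minimal_swap_cost
-- ===== SOURCE A (Python) =====
-- def minimal_swap_cost(arrA, arrB):
--     # Sort both arrays
--     arrA.sort()
--     arrB.sort()
--
--     # Arrays to keep track of students that need to be swapped
--     swap_A = []
--     swap_B = []
--
--     # Track frequency of mismatched elements
--     freqA = {}
--     freqB = {}
--
--     # Fill frequency dictionaries
--     for h in arrA:
--         freqA[h] = freqA.get(h, 0) + 1
--     for h in arrB:
--         freqB[h] = freqB.get(h, 0) + 1
--
--     # Check if it's impossible to match heights
--     all_heights = set(arrA + arrB)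
--     for height in all_heights:
--         total = freqA.get(height, 0) + freqB.get(height, 0)
--         if total % 2 != 0:
--             return -1  # If any height appears an odd number of times, it's impossible
--
--     # Find students that need to be swapped
--     for height in all_heights:
--         excess_in_A = max(0, freqA.get(height, 0) - freqB.get(height, 0)) // 2
--         excess_in_B = max(0, freqB.get(height, 0) - freqA.get(height, 0)) // 2
--
--         swap_A.extend([height] * excess_in_A)
--         swap_B.extend([height] * excess_in_B)
--
--     # If we have mismatches in swap_A and swap_B, we need to swap the smaller elements
--     swap_A.sort()
--     swap_B.sort(reverse=True)
--
--     # Calculate the cost of swapping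
--     min_height = min(arrA + arrB)
--     swap_count = len(swap_A)
--     total_cost = 0
--
--     for i in range(swap_count):
--         total_cost += min(2 * min_height, min(swap_A[i], swap_B[i]))
--
--     return total_cost
-- ===== SOURCE B (Python) =====
-- def _pairs_ok(m):
--     # sorted list pairs up (m[0]==m[1], m[2]==m[3], ...) iff every value occurs an even number of times
--     i = 0
--     n = len(m)
--     while i + 1 < n:
--         if m[i] != m[i + 1]:
--             return False
--         i += 2
--     return i == n
--
--
-- def minimal_swap_cost(arrA, arrB):
--     # No dicts or sets at all: parity is read off adjacent pairs of the sorted merged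
--     # list, the surplus elements come from a two-pointer multiset difference of the two
--     # sorted arrays, and the halving (excess // 2) is a stride-2 slice of those runs.
--     arrA.sort()
--     arrB.sort()
--     merged = sorted(arrA + arrB)
--     if not _pairs_ok(merged):
--         return -1
--
--     # two-pointer walk: elements only in A (with multiplicity), elements only in B
--     only_a, only_b = [], []
--     i = j = 0
--     while i < len(arrA) and j < len(arrB):
--         if arrA[i] == arrB[j]:
--             i += 1
--             j += 1
--         elif arrA[i] < arrB[j]:
--             only_a.append(arrA[i])
--             i += 1
--         else:
--             only_b.append(arrB[j])
--             j += 1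
--     only_a.extend(arrA[i:])
--     only_b.extend(arrB[j:])
--
--     surplus_a = only_a[::2]      # every run has even length, so this halves each run
--     surplus_b = only_b[::-2]     # same, descending
--     cap = 2 * merged[0]          # merged[0] is the global minimum (IndexError when both empty)
--     return sum(min(cap, a, b) for a, b in zip(surplus_a, surplus_b))
-- ===== Notes on version B (the rewrite author's own statement) =====
-- stated objective: alternative
-- what changed: B uses no dicts or sets at all: parity is checked by pairing adjacent elements of the sorted merged list, the surplus elements come from a two-pointer multiset-difference walk over the two sorted arrays, and the excess//2 halving is a stride-2 slice of those runs (only_a[::2] vs only_b[::-2]) summed over a zip.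
import Mathlib
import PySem

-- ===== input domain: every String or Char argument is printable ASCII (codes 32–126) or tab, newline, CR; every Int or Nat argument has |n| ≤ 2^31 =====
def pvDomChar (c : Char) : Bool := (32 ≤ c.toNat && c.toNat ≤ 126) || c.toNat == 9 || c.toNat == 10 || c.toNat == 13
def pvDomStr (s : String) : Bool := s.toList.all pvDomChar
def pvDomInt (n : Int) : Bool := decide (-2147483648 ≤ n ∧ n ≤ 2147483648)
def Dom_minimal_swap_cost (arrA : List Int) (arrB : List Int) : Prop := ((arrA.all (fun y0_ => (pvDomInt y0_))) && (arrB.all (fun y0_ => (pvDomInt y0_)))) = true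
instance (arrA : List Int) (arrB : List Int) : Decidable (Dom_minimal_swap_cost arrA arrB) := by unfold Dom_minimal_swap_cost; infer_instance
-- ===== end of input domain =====

-- B drops A's frequency dicts and height set entirely: parity is read off adjacent pairs of
-- the sorted merged list, the surplus elements come from a two-pointer multiset difference of
-- the two sorted arrays, and the halving is a stride-2 slice; equivalence of the RETURN value
-- is proved (both Pythons sort their arguments in place).

-- ===== PORT A =====
def minimal_swap_cost (arrA : List Int) (arrB : List Int) : Int :=
  let sa := PySem.List.sorted arrA (fun x => x) false
  let sb := PySem.List.sorted arrB (fun x => x) false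
  let freqA := sa.foldl (fun d h => d.insert h (d.getD h 0 + 1)) (PySem.Dict.empty : PySem.Dict Int Int)
  let freqB := sb.foldl (fun d h => d.insert h (d.getD h 0 + 1)) (PySem.Dict.empty : PySem.Dict Int Int)
  let allHeights := PySem.Set.ofList (sa ++ sb)
  if allHeights.any (fun h => PySem.Int.mod (freqA.getD h 0 + freqB.getD h 0) 2 != 0) then -1
  else
    let swapA := allHeights.foldl (fun acc h =>
      acc ++ List.replicate ((PySem.Int.floordiv (max 0 (freqA.getD h 0 - freqB.getD h 0)) 2).toNat) h) []
    let swapB := allHeights.foldl (fun acc h =>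
      acc ++ List.replicate ((PySem.Int.floordiv (max 0 (freqB.getD h 0 - freqA.getD h 0)) 2).toNat) h) []
    let sA := PySem.List.sorted swapA (fun x => x) false
    let sB := PySem.List.sorted swapB (fun x => x) true
    let minH := (PySem.List.min? (sa ++ sb) (fun x => x)).getD 0   -- ValueError on empty input: excluded by Pre_
    (PySem.List.pyRange 0 (sA.length : Int) 1).foldl
      (fun acc i => acc + min (2 * minH) (min (PySem.List.pyGetD sA i 0) (PySem.List.pyGetD sB i 0))) 0
      -- pyGetD's default is dead under Pre_ (IndexError inputs are excluded)

-- ===== PORT B =====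
-- _pairs_ok: the sorted list pairs up (m[0]==m[1], m[2]==m[3], …) — two-at-a-time recursion
def pvPairsOK : List Int → Bool
  | [] => true
  | [_] => false
  | x :: y :: t => x == y && pvPairsOK t

-- the two-pointer while loop over the two sorted arrays (indices become structural recursion)
def pvTwoPtr : List Int → List Int → List Int × List Int
  | [], ys => ([], ys)
  | x :: xs, [] => (x :: xs, [])
  | x :: xs, y :: ys =>
    if x = y then pvTwoPtr xs ys
    else if x < y then
      let p := pvTwoPtr xs (y :: ys); (x :: p.1, p.2)
    else
      let p := pvTwoPtr (x :: xs) ys; (p.1, y :: p.2)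
termination_by xs ys => xs.length + ys.length

-- l[::2]
def pvEveryOther : List Int → List Int
  | [] => []
  | [x] => [x]
  | x :: _ :: t => x :: pvEveryOther t

def minimal_swap_cost_alt (arrA : List Int) (arrB : List Int) : Int :=
  let sa := PySem.List.sorted arrA (fun x => x) false
  let sb := PySem.List.sorted arrB (fun x => x) false
  let merged := PySem.List.sorted (sa ++ sb) (fun x => x) false
  if !(pvPairsOK merged) then -1
  else
    let p := pvTwoPtr sa sb
    let surplusA := pvEveryOther p.1            -- only_a[::2]
    let surplusB := pvEveryOther p.2.reverse    -- only_b[::-2]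
    let cap := 2 * PySem.List.pyGetD merged 0 0 -- merged[0]: IndexError on empty input, excluded by Pre_
    ((surplusA.zip surplusB).map (fun q => min cap (min q.1 q.2))).sum

-- ===== PRECONDITION & SPEC =====
-- Pre_ excludes exactly the inputs where Python A raises: both lists empty (min() ValueError), and
-- even-parity inputs with len(arrA) > len(arrB) (swap_B[i] IndexError in the final loop).
def Pre_minimal_swap_cost (arrA : List Int) (arrB : List Int) : Prop :=
  (∃ h ∈ arrA ++ arrB, ¬ (2 ∣ (arrA.count h + arrB.count h))) ∨
    (arrA.length ≤ arrB.length ∧ (arrA ≠ [] ∨ arrB ≠ []))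
instance (arrA : List Int) (arrB : List Int) : Decidable (Pre_minimal_swap_cost arrA arrB) := by
  unfold Pre_minimal_swap_cost; infer_instance
def pvWitness_minimal_swap_cost : List Int × List Int := ([2, 1], [1, 2])

def Spec_minimal_swap_cost (arrA : List Int) (arrB : List Int) (out : Int) : Prop := out = minimal_swap_cost_alt arrA arrB
instance (arrA : List Int) (arrB : List Int) (out : Int) : Decidable (Spec_minimal_swap_cost arrA arrB out) := by unfold Spec_minimal_swap_cost; infer_instance

-- ===== CLAIM (what is proved, stated in full; the proofs are below) =====
def Claim_equal_minimal_swap_cost : Prop := ∀ (arrA : List Int) (arrB : List Int), Dom_minimal_swap_cost arrA arrB → Pre_minimal_swap_cost arrA arrB → Spec_minimal_swap_cost arrA arrB (minimal_swap_cost arrA arrB)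

-- ===== LEMMAS AND PROOFS =====

-- getD of the increment-counting fold from the empty dict (A's freq loops)
theorem pv_freq_getD (l : List Int) (v : Int) :
    ((l.foldl (fun d h => d.insert h (d.getD h 0 + 1)) (PySem.Dict.empty : PySem.Dict Int Int)).getD v 0)
      = l.count v := by
  rw [PySem.Dict.getD_foldl_insert_add_one]; simp

-- max(0, ↑a - ↑b) // 2 as a Nat: (a - b) / 2 in truncated Nat arithmetic
theorem pv_kNat (a b : Nat) :
    (PySem.Int.floordiv (max 0 ((a:Int) - b)) 2).toNat = (a - b) / 2 := by
  rw [PySem.Int.floordiv_eq_ediv_of_pos (by norm_num)]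
  have h1 : max 0 ((a:Int) - b) = ((a - b : Nat) : Int) := by omega
  rw [h1, show ((2:Int) = ((2:Nat):Int)) from rfl, ← Int.natCast_div, Int.toNat_natCast]

-- a flatMap of replicate-blocks over a ≤-sorted list of heights is ≤-sorted
theorem pv_pairwise_flatMap_rep (H : List Int) (n : Int → Nat) (hp : H.Pairwise (· ≤ ·)) :
    (H.flatMap (fun h => List.replicate (n h) h)).Pairwise (· ≤ ·) := by
  induction H with
  | nil => simp
  | cons x t ih =>
    rw [List.pairwise_cons] at hp
    rw [List.flatMap_cons, List.pairwise_append]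
    refine ⟨?_, ih hp.2, ?_⟩
    · simp [List.pairwise_replicate]
    · intro a ha b hb
      rcases List.mem_flatMap.1 hb with ⟨h', hh', hb'⟩
      rw [List.eq_of_mem_replicate ha, List.eq_of_mem_replicate hb']
      exact hp.1 h' hh'

theorem pv_perm_eq_of_pairwise_le {l₁ l₂ : List Int} (h : l₁.Perm l₂)
    (s1 : l₁.Pairwise (· ≤ ·)) (s2 : l₂.Pairwise (· ≤ ·)) : l₁ = l₂ :=
  h.eq_of_pairwise (fun _ _ _ _ h1 h2 => le_antisymm h1 h2) s1 s2

theorem pv_perm_eq_of_pairwise_ge {l₁ l₂ : List Int} (h : l₁.Perm l₂)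
    (s1 : l₁.Pairwise (fun a b => b ≤ a)) (s2 : l₂.Pairwise (fun a b => b ≤ a)) : l₁ = l₂ :=
  h.eq_of_pairwise (fun _ _ _ _ h1 h2 => le_antisymm h2 h1) s1 s2

-- sorting a flatMap of replicate-blocks = flatMap over the sorted heights
theorem pv_sorted_flatMap_rep (H : List Int) (n : Int → Nat) :
    PySem.List.sorted (H.flatMap (fun h => List.replicate (n h) h)) (fun x => x) false
      = (PySem.List.sorted H (fun x => x) false).flatMap (fun h => List.replicate (n h) h) := by
  apply pv_perm_eq_of_pairwise_le
  · exact (PySem.List.sorted_perm ..).trans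
      (((PySem.List.sorted_perm H (fun x => x) false).flatMap (fun _ _ => List.Perm.refl _)).symm)
  · simpa using PySem.List.sorted_pairwise (H.flatMap (fun h => List.replicate (n h) h)) (fun x => x)
  · exact pv_pairwise_flatMap_rep _ _ (by simpa using PySem.List.sorted_pairwise H (fun x => x))

-- reverse-sorting it = the reverse of that flatMap
theorem pv_sorted_rev_flatMap_rep (H : List Int) (n : Int → Nat) :
    PySem.List.sorted (H.flatMap (fun h => List.replicate (n h) h)) (fun x => x) true
      = ((PySem.List.sorted H (fun x => x) false).flatMap (fun h => List.replicate (n h) h)).reverse := by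
  apply pv_perm_eq_of_pairwise_ge
  · exact (PySem.List.sorted_perm ..).trans
      ((((PySem.List.sorted_perm H (fun x => x) false).flatMap
          (fun _ _ => List.Perm.refl _)).symm).trans (List.reverse_perm _).symm)
  · simpa using PySem.List.sorted_pairwise_rev (H.flatMap (fun h => List.replicate (n h) h)) (fun x => x)
  · rw [List.pairwise_reverse]
    exact pv_pairwise_flatMap_rep _ _ (by simpa using PySem.List.sorted_pairwise H (fun x => x))

theorem pv_sum_indicator_zero (H : List Int) (a : Int) (ha : a ∉ H) :
    (H.map (fun h => if a = h then (1:Int) else 0)).sum = 0 := by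
  induction H with
  | nil => simp
  | cons x t ih =>
    simp only [List.mem_cons, not_or] at ha
    rw [List.map_cons, List.sum_cons, ih ha.2, if_neg ha.1]
    norm_num

theorem pv_sum_indicator_one (H : List Int) (a : Int) (hnd : H.Nodup) (ha : a ∈ H) :
    (H.map (fun h => if a = h then (1:Int) else 0)).sum = 1 := by
  induction H with
  | nil => cases ha
  | cons x t ih =>
    rw [List.nodup_cons] at hnd
    rcases List.mem_cons.1 ha with h | h
    · subst h; simp [pv_sum_indicator_zero t a hnd.1]
    · have hax : ¬ (a = x) := fun e => hnd.1 (e ▸ h)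
      simp [hax, ih hnd.2 h]

-- summing the counts of l over a nodup list containing all its elements gives the length
theorem pv_sum_count (l H : List Int) (hnd : H.Nodup) (hcov : ∀ x ∈ l, x ∈ H) :
    (H.map (fun h => (l.count h : Int))).sum = l.length := by
  induction l with
  | nil => simp
  | cons a t ih =>
    have hcov' : ∀ x ∈ t, x ∈ H := fun x hx => hcov x (List.mem_cons_of_mem a hx)
    have ha : a ∈ H := hcov a List.mem_cons_self
    have hmc : H.map (fun h => ((a :: t).count h : Int))
        = H.map (fun h => (t.count h : Int) + if a = h then (1:Int) else 0) := by
      apply List.map_congr_left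
      intro h _
      rw [List.count_cons]
      by_cases e : a = h <;> simp [e]
    rw [hmc, PySem.List.sum_map_add_int, ih hcov', pv_sum_indicator_one H a hnd ha]
    simp only [List.length_cons]
    push_cast
    ring

-- the surplus-A list is no longer than the surplus-B list when totals are even and |arrA| ≤ |arrB|
theorem pv_surplus_len_le (sa sb H : List Int) (hnd : H.Nodup)
    (hcovA : ∀ x ∈ sa, x ∈ H) (hcovB : ∀ x ∈ sb, x ∈ H)
    (heven : ∀ h ∈ H, 2 ∣ (sa.count h + sb.count h))
    (hlen : sa.length ≤ sb.length) :
    (H.flatMap (fun h => List.replicate ((sa.count h - sb.count h) / 2) h)).length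
      ≤ (H.flatMap (fun h => List.replicate ((sb.count h - sa.count h) / 2) h)).length := by
  rw [List.length_flatMap, List.length_flatMap]
  simp only [List.length_replicate]
  have hcast : ∀ (u : Int → Nat),
      ((H.map u).sum : Int) = (H.map (fun h => ((u h : Nat) : Int))).sum := by
    intro u
    rw [Nat.cast_list_sum, List.map_map]
    rfl
  have key : (H.map (fun h => 2 * (((sa.count h - sb.count h) / 2 : Nat) : Int))).sum
      = (H.map (fun h => ((sa.count h : Int) - sb.count h)
          + 2 * (((sb.count h - sa.count h) / 2 : Nat) : Int))).sum := by
    apply congrArg List.sum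
    apply List.map_congr_left
    intro h hm
    have hd := heven h hm
    omega
  rw [List.sum_map_mul_left, PySem.List.sum_map_add_int, List.sum_map_mul_left] at key
  have hsplit : (H.map (fun h => (sa.count h : Int) - sb.count h)).sum
      = (H.map (fun h => (sa.count h : Int))).sum - (H.map (fun h => (sb.count h : Int))).sum := by
    have : H.map (fun h => (sa.count h : Int) - sb.count h)
        = H.map (fun h => (sa.count h : Int) + (-1) * (sb.count h : Int)) := by
      apply List.map_congr_left; intro h _; ring
    rw [this, PySem.List.sum_map_add_int, List.sum_map_mul_left]
    ring
  rw [hsplit, pv_sum_count sa H hnd hcovA, pv_sum_count sb H hnd hcovB] at key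
  have h1 := hcast (fun h => (sa.count h - sb.count h) / 2)
  have h2 := hcast (fun h => (sb.count h - sa.count h) / 2)
  omega

-- the indexed summation loop over equal-length prefixes is the zip sum
theorem pv_fold_range_eq_zip_sum (xs ys : List Int) (c : Int) (hle : xs.length ≤ ys.length) :
    (PySem.List.pyRange 0 (xs.length : Int) 1).foldl
        (fun acc i => acc + min c (min (PySem.List.pyGetD xs i 0) (PySem.List.pyGetD ys i 0))) 0
      = ((xs.zip ys).map (fun p => min c (min p.1 p.2))).sum := by
  rw [PySem.List.foldl_add, zero_add]
  apply congrArg List.sum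
  apply List.ext_getElem
  · simp [PySem.List.length_pyRange_one, Nat.min_eq_left hle]
  · intro i h1 h2
    have hix : i < xs.length := by
      simpa [PySem.List.length_pyRange_one] using h1
    have hiy : i < ys.length := lt_of_lt_of_le hix hle
    rw [List.getElem_map, List.getElem_map, PySem.List.getElem_pyRange_one, List.getElem_zip]
    rw [zero_add, PySem.List.pyGetD_natCast, PySem.List.pyGetD_natCast,
      List.getD_eq_getElem xs 0 hix, List.getD_eq_getElem ys 0 hiy]

-- B-side: pairs check on a sorted list ⟺ every value occurs an even number of times
theorem pv_pairsOK_iff (l : List Int) (hs : l.Pairwise (· ≤ ·)) :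
    pvPairsOK l = true ↔ ∀ v : Int, 2 ∣ l.count v := by
  induction l using pvPairsOK.induct with
  | case1 => simp [pvPairsOK]
  | case2 x =>
    simp only [pvPairsOK, Bool.false_eq_true, false_iff]
    intro hall
    have hx := hall x
    simp at hx
  | case3 x y t ih =>
    rw [List.pairwise_cons] at hs
    obtain ⟨hx, hs⟩ := hs
    rw [List.pairwise_cons] at hs
    obtain ⟨hy, hst⟩ := hs
    by_cases e : x = y
    · subst e
      simp only [pvPairsOK, beq_self_eq_true, Bool.true_and]
      rw [ih hst]
      constructor
      · intro h v
        have hv := h v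
        simp only [List.count_cons, beq_iff_eq]
        by_cases e2 : x = v
        · simp only [if_pos e2]; omega
        · simp only [if_neg e2]; omega
      · intro h v
        have hv := h v
        simp only [List.count_cons, beq_iff_eq] at hv
        by_cases e2 : x = v
        · simp only [if_pos e2] at hv; omega
        · simp only [if_neg e2] at hv; omega
    · have hxy : x < y := lt_of_le_of_ne (hx y List.mem_cons_self) e
      have hxt : x ∉ t := fun hm => absurd (hy x hm) (by omega)
      have hpf : pvPairsOK (x :: y :: t) = false := by
        simp [pvPairsOK, e]
      rw [hpf]
      simp only [Bool.false_eq_true, false_iff]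
      intro hall
      have h1 := hall x
      have hc1 : List.count x (x :: y :: t) = 1 := by
        rw [List.count_cons_self, List.count_cons_of_ne (fun h => e h.symm), List.count_eq_zero.2 hxt]
      rw [hc1] at h1
      omega

-- B-side: the two-pointer walk computes the truncated count differences …
theorem pv_twoPtr_count (xs ys : List Int) (hx : xs.Pairwise (· ≤ ·)) (hy : ys.Pairwise (· ≤ ·)) :
    (∀ v, (pvTwoPtr xs ys).1.count v = xs.count v - ys.count v) ∧
    (∀ v, (pvTwoPtr xs ys).2.count v = ys.count v - xs.count v) := by
  induction xs, ys using pvTwoPtr.induct with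
  | case1 ys => simp [pvTwoPtr]
  | case2 x xs => simp [pvTwoPtr]
  | case3 xs y ys ih =>
    rw [List.pairwise_cons] at hx hy
    obtain ⟨h1, h2⟩ := ih hx.2 hy.2
    refine ⟨fun v => ?_, fun v => ?_⟩
    · simp only [pvTwoPtr, if_true]
      rw [h1 v]
      simp only [List.count_cons, beq_iff_eq]
      by_cases hv : y = v
      · simp only [if_pos hv]; omega
      · simp only [if_neg hv]; omega
    · simp only [pvTwoPtr, if_true]
      rw [h2 v]
      simp only [List.count_cons, beq_iff_eq]
      by_cases hv : y = v
      · simp only [if_pos hv]; omega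
      · simp only [if_neg hv]; omega
  | case4 x xs y ys he hlt ih =>
    rw [List.pairwise_cons] at hx
    have hyc := hy
    rw [List.pairwise_cons] at hyc
    have hys0 : List.count x (y :: ys) = 0 :=
      List.count_eq_zero.2 (by
        intro hm
        rcases List.mem_cons.1 hm with h | h
        · omega
        · have := hyc.1 x h; omega)
    have hyx : ¬ (y = x) := fun h => he h.symm
    have hys0' : List.count x ys = 0 := by
      simp only [List.count_cons, beq_iff_eq, if_neg hyx] at hys0
      omega
    obtain ⟨h1, h2⟩ := ih hx.2 hy
    refine ⟨fun v => ?_, fun v => ?_⟩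
    · simp only [pvTwoPtr, if_neg he, if_pos hlt]
      simp only [List.count_cons, beq_iff_eq, h1 v]
      by_cases hv : x = v
      · subst hv
        simp only [if_neg hyx]
        omega
      · simp only [if_neg hv]
        by_cases hy2 : y = v
        · simp only [if_pos hy2]; omega
        · simp only [if_neg hy2]; omega
    · simp only [pvTwoPtr, if_neg he, if_pos hlt]
      simp only [List.count_cons, beq_iff_eq, h2 v]
      by_cases hv : x = v
      · subst hv
        simp only [if_neg hyx]
        omega
      · simp only [if_neg hv]
        by_cases hy2 : y = v
        · simp only [if_pos hy2]; omega
        · simp only [if_neg hy2]; omega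
  | case5 x xs y ys he hge ih =>
    rw [List.pairwise_cons] at hy
    have hxc := hx
    rw [List.pairwise_cons] at hxc
    have hyx : y < x := by
      rcases lt_trichotomy x y with h | h | h
      · exact absurd h hge
      · exact absurd h he
      · exact h
    have hxs0 : List.count y (x :: xs) = 0 :=
      List.count_eq_zero.2 (by
        intro hm
        rcases List.mem_cons.1 hm with h | h
        · omega
        · have := hxc.1 y h; omega)
    have hxy : ¬ (x = y) := he
    have hxs0' : List.count y xs = 0 := by
      simp only [List.count_cons, beq_iff_eq, if_neg hxy] at hxs0
      omega
    obtain ⟨h1, h2⟩ := ih hx hy.2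
    refine ⟨fun v => ?_, fun v => ?_⟩
    · simp only [pvTwoPtr, if_neg he, if_neg hge]
      simp only [List.count_cons, beq_iff_eq, h1 v]
      by_cases hv : y = v
      · subst hv
        simp only [if_neg hxy]
        omega
      · simp only [if_neg hv]
        by_cases hx2 : x = v
        · simp only [if_pos hx2]; omega
        · simp only [if_neg hx2]; omega
    · simp only [pvTwoPtr, if_neg he, if_neg hge]
      simp only [List.count_cons, beq_iff_eq, h2 v]
      by_cases hv : y = v
      · subst hv
        simp only [if_neg hxy]
        omega
      · simp only [if_neg hv]
        by_cases hx2 : x = v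
        · simp only [if_pos hx2]; omega
        · simp only [if_neg hx2]; omega

-- … and its outputs stay sorted
theorem pv_twoPtr_sorted (xs ys : List Int) (hx : xs.Pairwise (· ≤ ·)) (hy : ys.Pairwise (· ≤ ·)) :
    (pvTwoPtr xs ys).1.Pairwise (· ≤ ·) ∧ (pvTwoPtr xs ys).2.Pairwise (· ≤ ·) := by
  induction xs, ys using pvTwoPtr.induct with
  | case1 ys => simp only [pvTwoPtr]; exact ⟨List.Pairwise.nil, hy⟩
  | case2 x xs => simp only [pvTwoPtr]; exact ⟨hx, List.Pairwise.nil⟩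
  | case3 xs y ys ih =>
    rw [List.pairwise_cons] at hx hy
    have := ih hx.2 hy.2
    simpa only [pvTwoPtr, if_true] using this
  | case4 x xs y ys he hlt ih =>
    rw [List.pairwise_cons] at hx
    obtain ⟨hs1, hs2⟩ := ih hx.2 hy
    obtain ⟨hc1, _⟩ := pv_twoPtr_count xs (y :: ys) hx.2 hy
    constructor
    · simp only [pvTwoPtr, if_neg he, if_pos hlt]
      rw [List.pairwise_cons]
      refine ⟨fun a ha => ?_, hs1⟩
      have hpos : 0 < List.count a (pvTwoPtr xs (y :: ys)).1 := List.count_pos_iff.2 ha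
      rw [hc1 a] at hpos
      exact hx.1 a (List.count_pos_iff.1 (by omega))
    · simpa only [pvTwoPtr, if_neg he, if_pos hlt] using hs2
  | case5 x xs y ys he hge ih =>
    rw [List.pairwise_cons] at hy
    obtain ⟨hs1, hs2⟩ := ih hx hy.2
    obtain ⟨_, hc2⟩ := pv_twoPtr_count (x :: xs) ys hx hy.2
    constructor
    · simpa only [pvTwoPtr, if_neg he, if_neg hge] using hs1
    · simp only [pvTwoPtr, if_neg he, if_neg hge]
      rw [List.pairwise_cons]
      refine ⟨fun a ha => ?_, hs2⟩
      have hpos : 0 < List.count a (pvTwoPtr (x :: xs) ys).2 := List.count_pos_iff.2 ha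
      rw [hc2 a] at hpos
      exact hy.1 a (List.count_pos_iff.1 (by omega))

-- counts of a flatMap of replicate-blocks over a nodup height list
theorem pv_count_flatMap_rep (H : List Int) (k : Int → Nat) (hnd : H.Nodup) (v : Int) :
    (H.flatMap (fun h => List.replicate (k h) h)).count v = if v ∈ H then k v else 0 := by
  induction H with
  | nil => simp
  | cons x t ih =>
    rw [List.nodup_cons] at hnd
    rw [List.flatMap_cons, List.count_append, List.count_replicate, ih hnd.2]
    by_cases hv : v = x
    · subst hv
      simp [hnd.1]
    · simp [hv, Ne.symm hv]

-- every-other of a ++ with even first part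
theorem pv_eo_append_even (xs ys : List Int) (h : 2 ∣ xs.length) :
    pvEveryOther (xs ++ ys) = pvEveryOther xs ++ pvEveryOther ys := by
  induction xs using pvPairsOK.induct with
  | case1 => simp [pvEveryOther]
  | case2 x => simp at h
  | case3 x y t ih =>
    have : 2 ∣ t.length := by simp at h ⊢; omega
    simp only [List.cons_append, pvEveryOther, ih this]

theorem pv_eo_replicate (m : Nat) (h : Int) :
    pvEveryOther (List.replicate (2 * m) h) = List.replicate m h := by
  induction m with
  | zero => simp [pvEveryOther]
  | succ n ih =>
    have : 2 * (n + 1) = (2 * n) + 1 + 1 := by omega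
    rw [this, List.replicate_succ, List.replicate_succ, pvEveryOther, ih]
    rfl

-- every-other of a flatMap of even replicate-blocks halves each block
theorem pv_eo_flatMap (H : List Int) (k : Int → Nat) (hk : ∀ h ∈ H, 2 ∣ k h) :
    pvEveryOther (H.flatMap (fun h => List.replicate (k h) h))
      = H.flatMap (fun h => List.replicate (k h / 2) h) := by
  induction H with
  | nil => simp [pvEveryOther]
  | cons x t ih =>
    rw [List.flatMap_cons, List.flatMap_cons,
      pv_eo_append_even _ _ (by simpa using hk x List.mem_cons_self),
      ih (fun h hm => hk h (List.mem_cons_of_mem x hm))]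
    obtain ⟨m, hm⟩ := hk x List.mem_cons_self
    have h2 : 2 * m / 2 = m := by omega
    rw [hm, h2, pv_eo_replicate]

-- head of the sorted merge is the Python min()
theorem pv_head_sorted_min (l : List Int) (hne : l ≠ []) :
    PySem.List.pyGetD (PySem.List.sorted l (fun x => x) false) 0 0
      = (PySem.List.min? l (fun x => x)).getD 0 := by
  obtain ⟨m, t, hmt⟩ : ∃ m t, PySem.List.sorted l (fun x => x) false = m :: t := by
    cases hs : PySem.List.sorted l (fun x => x) false with
    | nil => exact absurd ((PySem.List.sorted_eq_nil_iff ..).1 hs) hne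
    | cons m t => exact ⟨m, t, rfl⟩
  obtain ⟨mv, hmv⟩ : ∃ mv, PySem.List.min? l (fun x => x) = some mv := by
    cases hm : PySem.List.min? l (fun x => x) with
    | none => exact absurd ((PySem.List.min?_eq_none_iff ..).1 hm) hne
    | some mv => exact ⟨mv, rfl⟩
  rw [hmt, hmv, PySem.List.pyGetD_zero_cons, Option.getD_some]
  have h1 : m ≤ mv := PySem.List.key_head_sorted_le l (fun x => x) hmt mv (PySem.List.min?_mem hmv)
  have h2 : mv ≤ m := by
    refine PySem.List.min?_isMin hmv m ?_
    have : m ∈ PySem.List.sorted l (fun x => x) false := by rw [hmt]; exact List.mem_cons_self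
    exact (PySem.List.mem_sorted ..).1 this
  omega

-- ===== VERDICT (by name: the statement is the Claim_ definition above) =====
theorem minimal_swap_cost_spec : Claim_equal_minimal_swap_cost := by
  intro arrA arrB _ hpre
  unfold Pre_minimal_swap_cost at hpre
  unfold Spec_minimal_swap_cost minimal_swap_cost minimal_swap_cost_alt
  simp only [pv_freq_getD]
  set sa := PySem.List.sorted arrA (fun x => x) false with hsa
  set sb := PySem.List.sorted arrB (fun x => x) false with hsb
  have hsaP : sa.Pairwise (· ≤ ·) := by simpa using PySem.List.sorted_pairwise arrA (fun x => x)
  have hsbP : sb.Pairwise (· ≤ ·) := by simpa using PySem.List.sorted_pairwise arrB (fun x => x)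
  have hca : ∀ v : Int, sa.count v = arrA.count v :=
    fun v => (PySem.List.sorted_perm arrA (fun x => x) false).count_eq v
  have hcb : ∀ v : Int, sb.count v = arrB.count v :=
    fun v => (PySem.List.sorted_perm arrB (fun x => x) false).count_eq v
  set merged := PySem.List.sorted (sa ++ sb) (fun x => x) false with hmg
  have hmP : merged.Pairwise (· ≤ ·) := by simpa using PySem.List.sorted_pairwise (sa ++ sb) (fun x => x)
  have hmc : ∀ v : Int, merged.count v = sa.count v + sb.count v := by
    intro v
    rw [hmg, (PySem.List.sorted_perm (sa ++ sb) (fun x => x) false).count_eq v, List.count_append]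
  -- the two parity tests coincide
  have hparity :
      (PySem.Set.ofList (sa ++ sb)).any
          (fun h => PySem.Int.mod ((sa.count h : Int) + (sb.count h : Int)) 2 != 0)
        = !(pvPairsOK merged) := by
    by_cases hall : ∀ v : Int, 2 ∣ merged.count v
    · have hpk : pvPairsOK merged = true := (pv_pairsOK_iff merged hmP).2 hall
      have hany : (PySem.Set.ofList (sa ++ sb)).any
          (fun h => PySem.Int.mod ((sa.count h : Int) + (sb.count h : Int)) 2 != 0) = false := by
        rw [List.any_eq_false]
        intro h hm
        have hd := hall h
        rw [hmc h] at hd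
        have h0 : PySem.Int.mod ((sa.count h : Int) + (sb.count h : Int)) 2 = 0 := by
          rw [PySem.Int.mod_eq_emod_of_pos (by norm_num)]
          omega
        rw [h0]
        simp
      rw [hany, hpk]
      rfl
    · have hpk : pvPairsOK merged = false :=
        Bool.eq_false_iff.2 (fun h => hall ((pv_pairsOK_iff merged hmP).1 h))
      push_neg at hall
      obtain ⟨v, hv⟩ := hall
      rw [hmc v] at hv
      have hvm : v ∈ PySem.Set.ofList (sa ++ sb) := by
        rw [PySem.Set.mem_ofList]
        by_contra hnm
        rw [List.mem_append] at hnm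
        push_neg at hnm
        rw [List.count_eq_zero.2 hnm.1, List.count_eq_zero.2 hnm.2] at hv
        omega
      have hany : (PySem.Set.ofList (sa ++ sb)).any
          (fun h => PySem.Int.mod ((sa.count h : Int) + (sb.count h : Int)) 2 != 0) = true := by
        rw [List.any_eq_true]
        refine ⟨v, hvm, ?_⟩
        have : PySem.Int.mod ((sa.count v : Int) + (sb.count v : Int)) 2 ≠ 0 := by
          rw [PySem.Int.mod_eq_emod_of_pos (by norm_num)]
          omega
        simpa using this
      rw [hany, hpk]
      rfl
  rw [hparity]
  cases hb : pvPairsOK merged with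
  | false => simp
  | true =>
    simp only [Bool.not_true, Bool.false_eq_true, if_false]
    have heven : ∀ v : Int, 2 ∣ (sa.count v + sb.count v) := by
      intro v
      have hd := (pv_pairsOK_iff merged hmP).1 hb v
      rw [hmc v] at hd
      exact hd
    -- the heights, sorted and strictly increasing
    set Hs := PySem.List.sorted (PySem.Set.ofList (sa ++ sb)) (fun x => x) false with hHs
    have hHlt : Hs.Pairwise (· < ·) := by
      rw [hHs]; exact PySem.List.sorted_ofList_pairwise_lt (sa ++ sb)
    have hHle : Hs.Pairwise (· ≤ ·) := hHlt.imp (fun h => le_of_lt h)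
    have hHnd : Hs.Nodup := hHlt.imp (fun h => ne_of_lt h)
    have hHmem : ∀ v : Int, v ∈ Hs ↔ v ∈ sa ++ sb := by
      intro v
      rw [hHs, PySem.List.mem_sorted, PySem.Set.mem_ofList]
    -- A's sorted swap lists in canonical flatMap form
    rw [PySem.List.foldl_append_eq_flatMap, PySem.List.foldl_append_eq_flatMap,
      List.nil_append, List.nil_append]
    simp only [pv_kNat]
    rw [pv_sorted_flatMap_rep, pv_sorted_rev_flatMap_rep, ← hHs]
    -- B's two-pointer lists in the same canonical form
    have htc := pv_twoPtr_count sa sb hsaP hsbP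
    have hts := pv_twoPtr_sorted sa sb hsaP hsbP
    have honlyA : (pvTwoPtr sa sb).1
        = Hs.flatMap (fun h => List.replicate (sa.count h - sb.count h) h) := by
      apply pv_perm_eq_of_pairwise_le
      · rw [List.perm_iff_count]
        intro v
        rw [htc.1 v, pv_count_flatMap_rep Hs _ hHnd v]
        by_cases hv : v ∈ Hs
        · simp [hv]
        · have hnm : v ∉ sa ++ sb := fun hm => hv ((hHmem v).2 hm)
          rw [List.mem_append] at hnm
          push_neg at hnm
          simp [hv, List.count_eq_zero.2 hnm.1]
      · exact hts.1
      · exact pv_pairwise_flatMap_rep Hs _ hHle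
    have honlyB : (pvTwoPtr sa sb).2
        = Hs.flatMap (fun h => List.replicate (sb.count h - sa.count h) h) := by
      apply pv_perm_eq_of_pairwise_le
      · rw [List.perm_iff_count]
        intro v
        rw [htc.2 v, pv_count_flatMap_rep Hs _ hHnd v]
        by_cases hv : v ∈ Hs
        · simp [hv]
        · have hnm : v ∉ sa ++ sb := fun hm => hv ((hHmem v).2 hm)
          rw [List.mem_append] at hnm
          push_neg at hnm
          simp [hv, List.count_eq_zero.2 hnm.2]
      · exact hts.2
      · exact pv_pairwise_flatMap_rep Hs _ hHle
    have hkevenA : ∀ h ∈ Hs, 2 ∣ (sa.count h - sb.count h) := by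
      intro h _
      have := heven h
      omega
    have hkevenB : ∀ h ∈ Hs.reverse, 2 ∣ (sb.count h - sa.count h) := by
      intro h _
      have := heven h
      omega
    rw [honlyA, honlyB, pv_eo_flatMap Hs _ hkevenA]
    have hrevB : (Hs.flatMap (fun h => List.replicate (sb.count h - sa.count h) h)).reverse
        = Hs.reverse.flatMap (fun h => List.replicate (sb.count h - sa.count h) h) := by
      rw [List.reverse_flatMap]
      simp only [Function.comp_def, List.reverse_replicate]
    rw [hrevB, pv_eo_flatMap Hs.reverse _ hkevenB]
    have hrevB2 : Hs.reverse.flatMap (fun h => List.replicate ((sb.count h - sa.count h) / 2) h)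
        = (Hs.flatMap (fun h => List.replicate ((sb.count h - sa.count h) / 2) h)).reverse := by
      rw [List.reverse_flatMap]
      simp only [Function.comp_def, List.reverse_replicate]
    rw [hrevB2]
    -- the caps coincide
    have hne : sa ++ sb ≠ [] := by
      rcases hpre with ⟨h, hm, hodd⟩ | ⟨_, hne'⟩
      · exact absurd (by rw [← hca h, ← hcb h]; exact heven h) hodd
      · intro hnil
        rw [List.append_eq_nil_iff] at hnil
        have ha : arrA = [] := by
          have h1 := hnil.1
          rw [hsa] at h1
          exact (PySem.List.sorted_eq_nil_iff arrA (fun x => x) false).1 h1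
        have hbb : arrB = [] := by
          have h1 := hnil.2
          rw [hsb] at h1
          exact (PySem.List.sorted_eq_nil_iff arrB (fun x => x) false).1 h1
        rcases hne' with h | h
        · exact h ha
        · exact h hbb
    rw [hmg, pv_head_sorted_min (sa ++ sb) hne]
    -- length bound for the index loop, then both sides are the same zip sum
    rw [pv_fold_range_eq_zip_sum]
    rw [List.length_reverse]
    apply pv_surplus_len_le sa sb Hs hHnd
    · intro x hx
      exact (hHmem x).2 (List.mem_append.2 (Or.inl hx))
    · intro x hx
      exact (hHmem x).2 (List.mem_append.2 (Or.inr hx))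
    · intro h _
      exact heven h
    · rcases hpre with ⟨h, hm, hodd⟩ | ⟨hle, _⟩
      · exact absurd (by rw [← hca h, ← hcb h]; exact heven h) hodd
      · rw [hsa, hsb, PySem.List.length_sorted, PySem.List.length_sorted]
        exact hle
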